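-- pv_equiv track=rewrite | github.com/upesacm/100DaysOfCode-2025 | DSA/Sakshi_Kumari_590012344/Day_99/Question1..py | array_string_analysis
-- ===== SOURCE A (Python) =====
-- def array_string_analysis(arr, text):
--     sum_positive = 0
--     for num in arr:
--         if num > 0:
--             sum_positive += num
--
--     vowel_count = 0
--     text = text.lower()
--     for ch in text:
--         if ch == 'a' or ch == 'e' or ch == 'i' or ch == 'o' or ch == 'u':
--             vowel_count += 1
--
--     return sum_positive, vowel_count
-- ===== SOURCE B (Python) =====
-- def array_string_analysis(arr, text):
--     # Sort, then sum the positive suffix by scanning back from the largest element.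
--     s = sorted(arr)
--     sum_positive = 0
--     i = len(s) - 1
--     while i >= 0 and s[i] > 0:
--         sum_positive += s[i]
--         i -= 1
--     # Five per-vowel substring-count passes over the lowered text.
--     t = text.lower()
--     vowel_count = 0
--     for v in "aeiou":
--         vowel_count += t.count(v)
--     return sum_positive, vowel_count
-- ===== Notes on version B (the rewrite author's own statement) =====
-- stated objective: alternative
-- what changed: Positive sum is computed by sorting the array and scanning its positive suffix backwards with an early exit instead of filtering every element; vowel count is five per-vowel str.count passes over the lowered text instead of one per-character branch.
import Mathlib
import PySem

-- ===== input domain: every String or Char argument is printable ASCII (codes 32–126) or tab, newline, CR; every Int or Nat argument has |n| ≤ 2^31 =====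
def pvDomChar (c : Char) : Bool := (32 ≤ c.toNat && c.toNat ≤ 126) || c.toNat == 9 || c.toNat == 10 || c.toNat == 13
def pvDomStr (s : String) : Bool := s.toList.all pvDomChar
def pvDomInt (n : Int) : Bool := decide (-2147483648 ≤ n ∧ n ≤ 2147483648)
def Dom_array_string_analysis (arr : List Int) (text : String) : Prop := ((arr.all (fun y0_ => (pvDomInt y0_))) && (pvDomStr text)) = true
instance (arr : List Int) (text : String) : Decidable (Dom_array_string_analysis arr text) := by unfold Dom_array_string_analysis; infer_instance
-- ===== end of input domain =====

-- B sorts the array and sums its positive suffix by a backwards early-exit scan, and counts vowels via five per-vowel count passes (alternative decomposition; no speed claim).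

-- ===== PORT A =====
def array_string_analysis (arr : List Int) (text : String) : Int × Int :=
  let sum_positive : Int := arr.foldl (fun s num => if num > 0 then s + num else s) 0
  let t := (PySem.Str.lower text).toList
  let vowel_count : Int := t.foldl
    (fun vc ch => if ch == 'a' || ch == 'e' || ch == 'i' || ch == 'o' || ch == 'u' then vc + 1 else vc) 0
  (sum_positive, vowel_count)

-- ===== PORT B =====
-- 'while i >= 0 and s[i] > 0: sum += s[i]; i -= 1' with the countdown index i carried as n = i + 1
def altPosLoop (s : List Int) : Nat → Int → Int
  | 0, total => total
  | n + 1, total =>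
      let x := PySem.List.pyGetD s (n : Int) 0
      if x > 0 then altPosLoop s n (total + x) else total

def array_string_analysis_alt (arr : List Int) (text : String) : Int × Int :=
  let s := PySem.List.sorted arr (fun x => x) false
  let sum_positive : Int := altPosLoop s s.length 0
  let t := (PySem.Str.lower text).toList
  let vowel_count : Int :=
    ['a', 'e', 'i', 'o', 'u'].foldl (fun vc v => vc + (PySem.Chars.count t [v] : Int)) 0
  (sum_positive, vowel_count)

-- ===== PRECONDITION & SPEC =====
def Spec_array_string_analysis (arr : List Int) (text : String) (out : Int × Int) : Prop := out = array_string_analysis_alt arr text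
instance (arr : List Int) (text : String) (out : Int × Int) : Decidable (Spec_array_string_analysis arr text out) := by unfold Spec_array_string_analysis; infer_instance

-- ===== CLAIM (what is proved, stated in full; the proofs are below) =====
def Claim_equal_array_string_analysis : Prop := ∀ (arr : List Int) (text : String), Dom_array_string_analysis arr text → Spec_array_string_analysis arr text (array_string_analysis arr text)

-- ===== LEMMAS AND PROOFS =====

-- t.count(c) for a single character c is the character count
lemma chars_count_go_singleton (c : Char) (s : List Char) (fuel : Nat) (acc : Nat)
    (h : s.length ≤ fuel) : PySem.Chars.count.go [c] fuel s acc = acc + s.count c := by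
  induction s generalizing fuel acc with
  | nil => cases fuel <;> simp [PySem.Chars.count.go]
  | cons x t ih =>
    cases fuel with
    | zero => simp at h
    | succ f =>
      simp only [List.length_cons, Nat.succ_le_succ_iff] at h
      by_cases hx : x = c
      · subst hx
        simp [PySem.Chars.count.go, List.isPrefixOf, ih f _ h]
        omega
      · simp [PySem.Chars.count.go, List.isPrefixOf, hx, ih f _ h, Ne.symm hx]

lemma chars_count_singleton (c : Char) (s : List Char) :
    PySem.Chars.count s [c] = s.count c := by
  simp [PySem.Chars.count, chars_count_go_singleton c s s.length 0 le_rfl]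

-- A's one-pass vowel branch counts the same as summing the five per-vowel counts
lemma vowel_countP (l : List Char) :
    (l.countP (fun c => c == 'a' || c == 'e' || c == 'i' || c == 'o' || c == 'u') : Int) =
      (l.count 'a' : Int) + l.count 'e' + l.count 'i' + l.count 'o' + l.count 'u' := by
  induction l with
  | nil => simp
  | cons c t ih =>
    simp only [List.countP_cons, List.count_cons]
    by_cases ha : c = 'a' <;> by_cases he : c = 'e' <;> by_cases hi : c = 'i' <;>
      by_cases ho : c = 'o' <;> by_cases hu : c = 'u' <;>
      simp_all <;> omega

lemma pos_sum_foldl (arr : List Int) (a : Int) :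
    arr.foldl (fun s num => if num > 0 then s + num else s) a = a + (arr.filter (fun n => n > 0)).sum := by
  induction arr generalizing a with
  | nil => simp
  | cons x xs ih =>
    simp only [List.foldl_cons, List.filter_cons]
    by_cases h : x > 0 <;> simp [h, ih]
    ring

-- on a sorted list, the backwards positive-suffix scan sums exactly the positives of the prefix it covers
lemma altPosLoop_sorted (s : List Int) (hs : s.Pairwise (· ≤ ·)) :
    ∀ (n : Nat), n ≤ s.length → ∀ (t : Int),
      altPosLoop s n t = t + ((s.take n).filter (fun x => x > 0)).sum := by
  intro n
  induction n with
  | zero => intro _ t; simp [altPosLoop]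
  | succ n ih =>
    intro hn t
    have hlt : n < s.length := hn
    have hstep : altPosLoop s (n + 1) t = if s[n] > 0 then altPosLoop s n (t + s[n]) else t := by
      simp only [altPosLoop, PySem.List.pyGetD_natCast, List.getD_eq_getElem?_getD,
        List.getElem?_eq_getElem hlt, Option.getD_some]
    have htake : s.take (n + 1) = s.take n ++ [s[n]] := by
      rw [List.take_add_one, List.getElem?_eq_getElem hlt]; rfl
    by_cases hx : s[n] > 0
    · rw [hstep, if_pos hx, ih (Nat.le_of_lt hlt) (t + s[n])]
      rw [htake, List.filter_append]
      simp [hx]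
      ring
    · rw [hstep, if_neg hx]
      have hall : ∀ x ∈ s.take (n + 1), ¬ (x > 0) := by
        intro x hxmem
        obtain ⟨j, hj, rfl⟩ := List.getElem_of_mem hxmem
        have hjlen : j < n + 1 := lt_of_lt_of_le hj (by simp)
        rw [List.getElem_take]
        rcases Nat.lt_or_ge j n with hjn | hjn
        · have := List.pairwise_iff_getElem.1 hs j n (by omega) hlt hjn
          omega
        · have : j = n := by omega
          subst this; omega
      have : (s.take (n + 1)).filter (fun x => x > 0) = [] := by
        rw [List.filter_eq_nil_iff]
        intro x hxmem
        simpa using hall x hxmem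
      rw [this]; simp

-- ===== VERDICT (by name: the statement is the Claim_ definition above) =====
theorem array_string_analysis_spec : Claim_equal_array_string_analysis := by
  intro arr text _
  unfold Spec_array_string_analysis array_string_analysis array_string_analysis_alt
  dsimp only
  refine Prod.ext ?_ ?_
  · show arr.foldl (fun s num => if num > 0 then s + num else s) 0 = _
    have hperm : (PySem.List.sorted arr (fun x => x) false).Perm arr :=
      PySem.List.sorted_perm arr (fun x => x) false
    have hpw : (PySem.List.sorted arr (fun x => x) false).Pairwise (· ≤ ·) :=
      PySem.List.sorted_pairwise arr (fun x => x)
    rw [pos_sum_foldl arr 0,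
      altPosLoop_sorted _ hpw _ le_rfl 0, List.take_length]
    have := ((hperm.filter (fun x => decide (x > 0)))).sum_eq
    simpa using this.symm
  · show _ = _
    simp only [PySem.List.foldl_if_add_one]
    have hfold : ∀ (l : List Char) (a : Int),
        ['a','e','i','o','u'].foldl (fun vc v => vc + (PySem.Chars.count l [v] : Int)) a =
          a + (l.count 'a' : Int) + l.count 'e' + l.count 'i' + l.count 'o' + l.count 'u' := by
      intro l a
      simp [List.foldl, chars_count_singleton]
    rw [hfold]
    have h := vowel_countP (PySem.Str.lower text).toList
    omega
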